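-- pv_equiv track=rewrite | github.com/baloncek2662/advent-of-code-2020 | solutions/day_09.py | is_sum_of_preamble
-- ===== SOURCE A (Python) =====
-- PREAMBLE = 25
--
-- def is_sum_of_preamble(list, i):
--     expected_sum = list[i]
--     sublist = list[i - PREAMBLE:i]
--
--     for a in sublist:
--         b = expected_sum - a
--         if b in sublist:
--             return True
--
--     return False
-- ===== SOURCE B (Python) =====
-- PREAMBLE = 25
--
-- def is_sum_of_preamble(list, i):
--     expected_sum = list[i]
--     sub = sorted(list[i - PREAMBLE:i])
--     l, r = 0, len(sub) - 1
--     while l <= r: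
--         s = sub[l] + sub[r]
--         if s == expected_sum:
--             return True
--         if s < expected_sum:
--             l += 1
--         else:
--             r -= 1
--     return False
-- ===== Notes on version B (the rewrite author's own statement) =====
-- stated objective: alternative
-- what changed: Replaces the scan-with-inner-membership-test (for each a, 'expected-a in sublist') by sorting the 25-element window once and running a two-pointer two-sum with l <= r, so a value may pair with itself exactly as in A.
import Mathlib
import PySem

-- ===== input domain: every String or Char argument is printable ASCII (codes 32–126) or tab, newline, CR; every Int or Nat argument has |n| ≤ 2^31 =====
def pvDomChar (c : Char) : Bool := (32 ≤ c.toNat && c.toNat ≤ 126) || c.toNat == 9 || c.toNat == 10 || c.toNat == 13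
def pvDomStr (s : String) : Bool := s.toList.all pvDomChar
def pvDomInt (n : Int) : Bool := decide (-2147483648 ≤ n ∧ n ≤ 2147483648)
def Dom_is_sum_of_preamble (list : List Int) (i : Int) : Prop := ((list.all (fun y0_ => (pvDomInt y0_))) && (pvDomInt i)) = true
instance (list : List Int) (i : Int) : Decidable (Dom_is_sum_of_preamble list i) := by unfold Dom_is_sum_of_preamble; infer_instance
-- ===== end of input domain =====

-- B sorts the 25-element window once and runs the classic two-pointer two-sum (l <= r so a
-- value may pair with itself), instead of A's scan with an inner membership test.

-- ===== PORT A =====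
-- the 'for a in sublist: if expected_sum - a in sublist: return True' loop
def pvLoopA (expected : Int) (sublist : List Int) : List Int → Bool
  | [] => false
  | a :: rest =>
      if sublist.contains (expected - a) then true else pvLoopA expected sublist rest

def is_sum_of_preamble (list : List Int) (i : Int) : Bool :=
  match PySem.List.pyGet? list i with
  | none => false   -- unreachable under Pre_ (Python raises IndexError)
  | some expected_sum =>
      let sublist := PySem.List.slice list (some (i - 25)) (some i)
      pvLoopA expected_sum sublist sublist

-- ===== PORT B =====
-- the 'while l <= r' two-pointer loop of Source B; indices stay in range whenever l ≤ r
def pvTwoPtr (sub : List Int) (target : Int) (l r : Int) : Bool :=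
  if l ≤ r then
    if PySem.List.pyGetD sub l 0 + PySem.List.pyGetD sub r 0 = target then true
    else if PySem.List.pyGetD sub l 0 + PySem.List.pyGetD sub r 0 < target then
      pvTwoPtr sub target (l + 1) r
    else
      pvTwoPtr sub target l (r - 1)
  else false
termination_by (r + 1 - l).toNat
decreasing_by all_goals omega

def is_sum_of_preamble_alt (list : List Int) (i : Int) : Bool :=
  match PySem.List.pyGet? list i with
  | none => false   -- unreachable under Pre_ (Python raises IndexError)
  | some expected_sum =>
      let sub := PySem.List.sorted (PySem.List.slice list (some (i - 25)) (some i)) (fun x => x) false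
      pvTwoPtr sub expected_sum 0 ((sub.length : Int) - 1)

-- ===== PRECONDITION & SPEC =====
-- Pre_ excludes exactly the inputs where Python A raises IndexError on list[i].
def Pre_is_sum_of_preamble (list : List Int) (i : Int) : Prop :=
  PySem.Raise.InRange list.length i
instance (list : List Int) (i : Int) : Decidable (Pre_is_sum_of_preamble list i) := by
  unfold Pre_is_sum_of_preamble; infer_instance

def pvWitness_is_sum_of_preamble : List Int × Int := ([1, 2, 3], 2)

def Spec_is_sum_of_preamble (list : List Int) (i : Int) (out : Bool) : Prop := out = is_sum_of_preamble_alt list i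
instance (list : List Int) (i : Int) (out : Bool) : Decidable (Spec_is_sum_of_preamble list i out) := by unfold Spec_is_sum_of_preamble; infer_instance

-- ===== CLAIM (what is proved, stated in full; the proofs are below) =====
def Claim_equal_is_sum_of_preamble : Prop := ∀ (list : List Int) (i : Int), Dom_is_sum_of_preamble list i → Pre_is_sum_of_preamble list i → Spec_is_sum_of_preamble list i (is_sum_of_preamble list i)

-- ===== LEMMAS AND PROOFS =====

-- A's loop is an 'any' over the window
theorem pvLoopA_eq_any (expected : Int) (sublist rem : List Int) :
    pvLoopA expected sublist rem = rem.any (fun a => sublist.contains (expected - a)) := by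
  induction rem with
  | nil => rfl
  | cons a rest ih =>
      rw [pvLoopA, List.any_cons, ← ih]
      cases sublist.contains (expected - a)
      · simp
      · simp

theorem getD_mono_of_pairwise (sub : List Int) (hs : sub.Pairwise (· ≤ ·))
    (p q : Nat) (hpq : p ≤ q) (hq : q < sub.length) :
    sub.getD p 0 ≤ sub.getD q 0 := by
  rcases Nat.lt_or_ge p q with h | h
  · have := (List.pairwise_iff_getElem.mp hs) p q (by omega) hq h
    rwa [List.getD_eq_getElem _ _ (by omega), List.getD_eq_getElem _ _ hq]
  · have : p = q := by omega
    subst this; exact le_refl _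

-- two-pointer correctness on a sorted window
theorem pvTwoPtr_iff (sub : List Int) (target : Int) (hs : sub.Pairwise (· ≤ ·)) :
    ∀ (l r : Int), 0 ≤ l → r < (sub.length : Int) →
    (pvTwoPtr sub target l r = true ↔
      ∃ p q : Nat, l ≤ (p : Int) ∧ p ≤ q ∧ (q : Int) ≤ r ∧
        sub.getD p 0 + sub.getD q 0 = target) := by
  intro l r hl hr
  rw [pvTwoPtr]
  by_cases hlr : l ≤ r
  · have hlen : l.toNat < sub.length := by omega
    have hrlen : r.toNat < sub.length := by omega
    have hgl : PySem.List.pyGetD sub l 0 = sub.getD l.toNat 0 := by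
      rw [PySem.List.pyGetD_eq_getElem sub 0 hl (by omega), List.getD_eq_getElem _ _ hlen]
    have hgr : PySem.List.pyGetD sub r 0 = sub.getD r.toNat 0 := by
      rw [PySem.List.pyGetD_eq_getElem sub 0 (by omega) hr, List.getD_eq_getElem _ _ hrlen]
    rw [if_pos hlr, hgl, hgr]
    by_cases heq : sub.getD l.toNat 0 + sub.getD r.toNat 0 = target
    · simp only [if_pos heq, true_iff]
      exact ⟨l.toNat, r.toNat, by omega, by omega, by omega, heq⟩
    · rw [if_neg heq]
      by_cases hlt : sub.getD l.toNat 0 + sub.getD r.toNat 0 < target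
      · have IH := pvTwoPtr_iff sub target hs (l + 1) r (show (0:Int) ≤ l + 1 by omega) hr
        rw [if_pos hlt, IH]
        constructor
        · rintro ⟨p, q, h1, h2, h3, h4⟩
          exact ⟨p, q, by omega, h2, h3, h4⟩
        · rintro ⟨p, q, h1, h2, h3, h4⟩
          refine ⟨p, q, ?_, h2, h3, h4⟩
          by_contra hc
          have hpl : p = l.toNat := by clear IH; omega
          have hqr : sub.getD q 0 ≤ sub.getD r.toNat 0 :=
            getD_mono_of_pairwise sub hs q r.toNat (by omega) hrlen
          rw [hpl] at h4; omega
      · have IH := pvTwoPtr_iff sub target hs l (r - 1) hl (show r - 1 < (sub.length : Int) by omega)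
        rw [if_neg hlt, IH]
        constructor
        · rintro ⟨p, q, h1, h2, h3, h4⟩
          exact ⟨p, q, h1, h2, by omega, h4⟩
        · rintro ⟨p, q, h1, h2, h3, h4⟩
          refine ⟨p, q, h1, h2, ?_, h4⟩
          by_contra hc
          have hqr : q = r.toNat := by clear IH; omega
          have hpl : sub.getD l.toNat 0 ≤ sub.getD p 0 :=
            getD_mono_of_pairwise sub hs l.toNat p (by omega) (by omega)
          rw [hqr] at h4; omega
  · rw [if_neg hlr]
    simp only [Bool.false_eq_true, false_iff]
    rintro ⟨p, q, h1, h2, h3, _⟩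
    omega
termination_by l r => (r + 1 - l).toNat
decreasing_by all_goals omega

-- the pair-of-elements characterisation is invariant under rearrangement (the sort)
theorem exists_pair_iff (sub ss : List Int) (t : Int) (hmem : ∀ x : Int, x ∈ ss ↔ x ∈ sub) :
    (∃ a ∈ sub, ∃ b ∈ sub, a + b = t) ↔
    (∃ p q : Nat, (0 : Int) ≤ (p : Int) ∧ p ≤ q ∧ (q : Int) ≤ (ss.length : Int) - 1 ∧
      ss.getD p 0 + ss.getD q 0 = t) := by
  constructor
  · rintro ⟨a, ha, b, hb, hab⟩
    obtain ⟨p, hp, hpa⟩ := List.getElem_of_mem ((hmem a).mpr ha)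
    obtain ⟨q, hq, hqb⟩ := List.getElem_of_mem ((hmem b).mpr hb)
    rcases Nat.lt_or_ge p q with h | h
    · exact ⟨p, q, by omega, by omega, by omega, by
        rw [List.getD_eq_getElem _ _ hp, List.getD_eq_getElem _ _ hq, hpa, hqb, hab]⟩
    · exact ⟨q, p, by omega, by omega, by omega, by
        rw [List.getD_eq_getElem _ _ hq, List.getD_eq_getElem _ _ hp, hpa, hqb]; omega⟩
  · rintro ⟨p, q, _, hpq, hqr, hsum⟩
    have hq : q < ss.length := by omega
    have hp : p < ss.length := by omega
    refine ⟨ss.getD p 0, ?_, ss.getD q 0, ?_, hsum⟩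
    · exact (hmem _).mp (by rw [List.getD_eq_getElem _ _ hp]; exact List.getElem_mem hp)
    · exact (hmem _).mp (by rw [List.getD_eq_getElem _ _ hq]; exact List.getElem_mem hq)

-- A's value is the element-pair characterisation
theorem loopA_iff (t : Int) (sub : List Int) :
    (pvLoopA t sub sub = true ↔ ∃ a ∈ sub, ∃ b ∈ sub, a + b = t) := by
  rw [pvLoopA_eq_any]
  simp only [List.any_eq_true, List.contains_iff_mem]
  constructor
  · rintro ⟨a, ha, hb⟩
    exact ⟨a, ha, t - a, hb, by ring⟩
  · rintro ⟨a, ha, b, hb, hab⟩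
    exact ⟨a, ha, by rwa [show t - a = b by omega]⟩

-- ===== VERDICT (by name: the statement is the Claim_ definition above) =====
theorem is_sum_of_preamble_spec : Claim_equal_is_sum_of_preamble := by
  intro list i _ _
  unfold Spec_is_sum_of_preamble is_sum_of_preamble is_sum_of_preamble_alt
  cases h : PySem.List.pyGet? list i with
  | none => rfl
  | some t =>
      simp only []
      rw [Bool.eq_iff_iff]
      have hs : (PySem.List.sorted (PySem.List.slice list (some (i - 25)) (some i)) (fun x => x) false).Pairwise (· ≤ ·) :=
        PySem.List.sorted_pairwise _ _
      rw [loopA_iff, pvTwoPtr_iff _ t hs 0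
        (((PySem.List.sorted (PySem.List.slice list (some (i - 25)) (some i)) (fun x => x) false).length : Int) - 1)
        (by omega) (by omega)]
      exact exists_pair_iff _ _ t (fun x => PySem.List.mem_sorted _ _ _ x)
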